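-- pv_equiv track=rewrite | github.com/MassimoLauria/cnfgen | cnfformula/variables.py | indices_to_varoffset
-- ===== SOURCE A (Python) =====
-- def indices_to_varoffset(idxs, ranges):
--     """Convert the indices of a variable into its ID.
--
--     A variable is identified by an integer ID, but if it is one of
--     the variables of a group, it has an associate tuple of
--     indices. This function convert the indices into the
--     corresponding ID. **Beware** that this function assumes the
--     variable IDs in this group start from 1. To use it properly
--     the ID must be shifted afterward.
--
--     Parameters
--     ----------
--     idxs : sequences(positive integers)
--         the indices of the variable
--     ranges : sequence(positive integers)
--         the indices ranges for the group of variables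
--
--     Returns
--     -------
--         int
--
--     Raises
--     ------
--     ValueError
--         when the indices are not within the ranges
--
--     """
--     weight = 1
--     total = 1
--     for i, w in zip(idxs[::-1], ranges[::-1]):
--         if i > w or i < 1:
--             raise ValueError('Index out of range')
--         total += (i - 1) * weight
--         weight *= w
--     return total
-- ===== SOURCE B (Python) =====
-- def indices_to_varoffset(idxs, ranges):
--     n = min(len(idxs), len(ranges))
--     total = 0
--     for i, w in zip(idxs[len(idxs) - n:], ranges[len(ranges) - n:]):
--         if i < 1 or i > w:
--             raise ValueError('Index out of range')
--         total = total * w + (i - 1)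
--     return total + 1
-- ===== Notes on version B (the rewrite author's own statement) =====
-- stated objective: alternative
-- what changed: Replaces the reversed least-significant-first loop with two accumulators (weight, total) by a single forward Horner pass total = total*w + (i-1) over the right-aligned tails, dropping the weight accumulator.
import Mathlib
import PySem

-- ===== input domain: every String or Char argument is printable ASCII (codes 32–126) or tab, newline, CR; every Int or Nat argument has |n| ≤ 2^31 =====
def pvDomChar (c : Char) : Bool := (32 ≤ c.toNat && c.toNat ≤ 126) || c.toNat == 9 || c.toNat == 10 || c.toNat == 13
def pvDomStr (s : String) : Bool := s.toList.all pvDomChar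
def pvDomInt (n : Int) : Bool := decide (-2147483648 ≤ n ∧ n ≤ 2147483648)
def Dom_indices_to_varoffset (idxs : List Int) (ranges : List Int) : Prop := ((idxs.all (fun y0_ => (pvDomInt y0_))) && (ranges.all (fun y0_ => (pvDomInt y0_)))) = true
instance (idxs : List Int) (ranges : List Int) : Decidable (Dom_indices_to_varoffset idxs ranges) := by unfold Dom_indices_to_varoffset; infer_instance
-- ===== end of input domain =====

-- B replaces A's reversed two-accumulator (weight, total) loop by a forward Horner pass over the
-- right-aligned tails; same values everywhere A returns (objective: alternative decomposition).

-- ===== PORT A =====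
-- A's loop over zip(idxs[::-1], ranges[::-1]); none = ValueError('Index out of range').
def pvLoopA : List (Int × Int) → Int → Int → Option Int
  | [], _, total => some total
  | (i, w) :: rest, weight, total =>
    if i > w ∨ i < 1 then none
    else pvLoopA rest (weight * w) (total + (i - 1) * weight)

def indices_to_varoffset (idxs : List Int) (ranges : List Int) : Int :=
  (pvLoopA (List.zip idxs.reverse ranges.reverse) 1 1).getD 0

-- ===== PORT B =====
-- B's forward Horner loop; none = ValueError('Index out of range').
def pvLoopB : List (Int × Int) → Int → Option Int
  | [], total => some total
  | (i, w) :: rest, total =>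
    if i < 1 ∨ i > w then none
    else pvLoopB rest (total * w + (i - 1))

def indices_to_varoffset_alt (idxs : List Int) (ranges : List Int) : Int :=
  let n := min idxs.length ranges.length
  match pvLoopB (List.zip (idxs.drop (idxs.length - n)) (ranges.drop (ranges.length - n))) 0 with
  | some t => t + 1
  | none => 0

-- ===== PRECONDITION & SPEC =====
-- Pre_ = exactly the inputs on which A returns (every right-aligned pair in range; otherwise A raises ValueError).
def Pre_indices_to_varoffset (idxs : List Int) (ranges : List Int) : Prop :=
  ∀ p ∈ List.zip idxs.reverse ranges.reverse, 1 ≤ p.1 ∧ p.1 ≤ p.2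
instance (idxs : List Int) (ranges : List Int) : Decidable (Pre_indices_to_varoffset idxs ranges) := by
  unfold Pre_indices_to_varoffset; infer_instance

def pvWitness_indices_to_varoffset : List Int × List Int := ([2, 1, 3], [3, 2, 4])

def Spec_indices_to_varoffset (idxs : List Int) (ranges : List Int) (out : Int) : Prop :=
  out = indices_to_varoffset_alt idxs ranges
instance (idxs : List Int) (ranges : List Int) (out : Int) : Decidable (Spec_indices_to_varoffset idxs ranges out) := by
  unfold Spec_indices_to_varoffset; infer_instance

-- ===== CLAIM (what is proved, stated in full; the proofs are below) =====
def Claim_equal_indices_to_varoffset : Prop := ∀ (idxs : List Int) (ranges : List Int), Dom_indices_to_varoffset idxs ranges → Pre_indices_to_varoffset idxs ranges → Spec_indices_to_varoffset idxs ranges (indices_to_varoffset idxs ranges)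

-- ===== LEMMAS AND PROOFS =====

-- mixed-radix value of a least-significant-first pair list
def pvVal : List (Int × Int) → Int
  | [] => 0
  | (i, w) :: rest => (i - 1) + w * pvVal rest

lemma pvLoopA_eq (L : List (Int × Int)) (h : ∀ p ∈ L, 1 ≤ p.1 ∧ p.1 ≤ p.2) :
    ∀ weight total, pvLoopA L weight total = some (total + weight * pvVal L) := by
  induction L with
  | nil => intro weight total; simp [pvLoopA, pvVal]
  | cons p rest ih =>
    intro weight total
    obtain ⟨i, w⟩ := p
    have hp := h (i, w) (List.mem_cons_self ..)
    have hrest : ∀ p ∈ rest, 1 ≤ p.1 ∧ p.1 ≤ p.2 := fun q hq => h q (List.mem_cons_of_mem _ hq)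
    simp only [pvLoopA, pvVal]
    rw [if_neg (by omega : ¬(i > w ∨ i < 1)), ih hrest]
    congr 1; ring

lemma pvLoopB_append (L : List (Int × Int)) (i w : Int) (hiw : 1 ≤ i ∧ i ≤ w)
    (h : ∀ p ∈ L, 1 ≤ p.1 ∧ p.1 ≤ p.2) :
    ∀ total, pvLoopB (L ++ [(i, w)]) total =
      (pvLoopB L total).map (fun t => t * w + (i - 1)) := by
  induction L with
  | nil => intro total; simp [pvLoopB, if_neg (by omega : ¬(i < 1 ∨ i > w))]
  | cons q rest ih =>
    intro total
    obtain ⟨j, v⟩ := q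
    have hq := h (j, v) (List.mem_cons_self ..)
    have hrest : ∀ p ∈ rest, 1 ≤ p.1 ∧ p.1 ≤ p.2 := fun q hq => h q (List.mem_cons_of_mem _ hq)
    simp only [List.cons_append, pvLoopB]
    rw [if_neg (by omega : ¬(j < 1 ∨ j > v)), ih hrest,
        if_neg (by omega : ¬(j < 1 ∨ j > v))]

lemma pvLoopB_reverse (L : List (Int × Int)) (h : ∀ p ∈ L, 1 ≤ p.1 ∧ p.1 ≤ p.2) :
    pvLoopB L.reverse 0 = some (pvVal L) := by
  induction L with
  | nil => simp [pvLoopB, pvVal]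
  | cons p rest ih =>
    obtain ⟨i, w⟩ := p
    have hp := h (i, w) (List.mem_cons_self ..)
    have hrest : ∀ p ∈ rest, 1 ≤ p.1 ∧ p.1 ≤ p.2 := fun q hq => h q (List.mem_cons_of_mem _ hq)
    simp only [List.reverse_cons]
    rw [pvLoopB_append _ _ _ hp (by intro q hq; exact hrest q (List.mem_reverse.mp hq)), ih hrest]
    simp [pvVal]; ring

lemma pvZip_rev (a : List Int) : ∀ b : List Int, a.length = b.length →
    a.reverse.zip b.reverse = (a.zip b).reverse := by
  induction a with
  | nil => intro b h; simp
  | cons x a' ih =>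
    intro b h
    cases b with
    | nil => simp at h
    | cons y b' =>
      simp only [List.reverse_cons, List.zip_cons_cons]
      rw [List.zip_append (by simpa using h), ih b' (by simpa using h)]
      simp

-- B's forward zip list is the reverse of A's reversed zip list
lemma pvZip_tails (idxs ranges : List Int) :
    List.zip (idxs.drop (idxs.length - min idxs.length ranges.length))
             (ranges.drop (ranges.length - min idxs.length ranges.length)) =
    (List.zip idxs.reverse ranges.reverse).reverse := by
  set n := min idxs.length ranges.length with hn
  have h1 : (idxs.drop (idxs.length - n)).length = n := by
    simp [List.length_drop]; omega
  have h2 : (ranges.drop (ranges.length - n)).length = n := by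
    simp [List.length_drop]; omega
  have hx : idxs.reverse = (idxs.drop (idxs.length - n)).reverse ++ (idxs.take (idxs.length - n)).reverse := by
    rw [← List.reverse_append, List.take_append_drop]
  have hy : ranges.reverse = (ranges.drop (ranges.length - n)).reverse ++ (ranges.take (ranges.length - n)).reverse := by
    rw [← List.reverse_append, List.take_append_drop]
  rw [hx, hy, List.zip_append (by simp [h1, h2])]
  have hjunk : List.zip (idxs.take (idxs.length - n)).reverse (ranges.take (ranges.length - n)).reverse = [] := by
    rcases Nat.le_total idxs.length ranges.length with hle | hle
    · have : idxs.length - n = 0 := by omega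
      simp [this]
    · have : ranges.length - n = 0 := by omega
      simp [this]
  rw [hjunk, List.append_nil, pvZip_rev _ _ (h1.trans h2.symm), List.reverse_reverse]

-- ===== VERDICT (by name: the statement is the Claim_ definition above) =====
theorem indices_to_varoffset_spec : Claim_equal_indices_to_varoffset := by
  intro idxs ranges _ hpre
  unfold Spec_indices_to_varoffset indices_to_varoffset indices_to_varoffset_alt
  simp only []
  rw [pvZip_tails, pvLoopA_eq _ hpre, pvLoopB_reverse _ hpre]
  simp; ring
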